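-- pv_equiv track=rewrite | github.com/Kishore276/AI-Agent | final_comprehensive_fix.py | determine_college_type
-- ===== SOURCE A (Python) =====
-- def determine_college_type(college_name: str) -> str:
--     """Determine college type for appropriate answers"""
--     name_upper = college_name.upper()
--
--     if "IIT" in name_upper:
--         return "IIT"
--     elif "NIT" in name_upper or "MNIT" in name_upper or "VNIT" in name_upper:
--         return "NIT"
--     elif "IIIT" in name_upper:
--         return "IIIT"
--     elif any(word in name_upper for word in ["GOVERNMENT", "STATE"]):
--         return "Government"
--     else:
--         return "Private"
-- ===== SOURCE B (Python) =====
-- LABELS = ["IIT", "NIT", "Government", "Private"]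
--
-- def determine_college_type(college_name: str) -> str:
--     """Determine college type for appropriate answers"""
--     u = college_name.upper()
--     best = 3
--     for i in range(len(u)):
--         if u.startswith("IIT", i):
--             p = 0
--         elif u.startswith("NIT", i):
--             p = 1
--         elif u.startswith("GOVERNMENT", i) or u.startswith("STATE", i):
--             p = 2
--         else:
--             p = 3
--         best = min(best, p)
--     return LABELS[best]
-- ===== Notes on version B (the rewrite author's own statement) =====
-- stated objective: alternative
-- what changed: Instead of A's chain of per-keyword substring searches, B makes a single left-to-right scan over the string, at each position checking which keyword starts there and keeping the minimum priority found; it also drops the redundant MNIT/VNIT checks (they contain NIT) and the dead IIIT branch (any IIIT contains IIT).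
import Mathlib
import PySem

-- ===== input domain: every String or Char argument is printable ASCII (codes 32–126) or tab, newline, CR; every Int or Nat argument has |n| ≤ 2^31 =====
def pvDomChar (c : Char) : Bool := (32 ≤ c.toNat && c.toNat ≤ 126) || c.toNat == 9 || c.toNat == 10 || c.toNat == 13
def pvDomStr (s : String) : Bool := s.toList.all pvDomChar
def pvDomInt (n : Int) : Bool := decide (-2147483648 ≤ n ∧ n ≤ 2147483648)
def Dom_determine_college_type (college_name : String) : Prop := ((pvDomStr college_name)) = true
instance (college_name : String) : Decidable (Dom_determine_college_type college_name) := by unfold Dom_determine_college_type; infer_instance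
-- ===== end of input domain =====

-- B replaces A's chain of per-keyword substring searches by one left-to-right scan keeping
-- the minimum-priority keyword starting at each position (alternative decomposition, same cost).

-- ===== PORT A =====
def determine_college_type (college_name : String) : String :=
  let name_upper := PySem.Str.upper college_name
  if PySem.Str.isIn "IIT" name_upper then "IIT"
  else if PySem.Str.isIn "NIT" name_upper || PySem.Str.isIn "MNIT" name_upper || PySem.Str.isIn "VNIT" name_upper then "NIT"
  else if PySem.Str.isIn "IIIT" name_upper then "IIIT"
  else if (["GOVERNMENT", "STATE"].any (fun word => PySem.Str.isIn word name_upper)) then "Government"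
  else "Private"

-- ===== PORT B =====
def dctLabels : List String := ["IIT", "NIT", "Government", "Private"]

-- priority of the keyword (if any) starting at this position (tail t = u[i:])
def dctPrio (t : List Char) : Nat :=
  if PySem.Chars.startswith t "IIT".toList then 0
  else if PySem.Chars.startswith t "NIT".toList then 1
  else if PySem.Chars.startswith t "GOVERNMENT".toList || PySem.Chars.startswith t "STATE".toList then 2
  else 3

-- the loop 'for i in range(len(u)): best = min(best, p)', walking position i as the tail u.drop i (u.startswith(kw, i) = kw <+: drop i)
def dctScan : List Char → Nat → Nat
  | [], best => best
  | c :: rest, best => dctScan rest (min best (dctPrio (c :: rest)))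

def determine_college_type_alt (college_name : String) : String :=
  let u := PySem.Str.upper college_name
  dctLabels.getD (dctScan u.toList 3) "Private"

-- ===== PRECONDITION & SPEC =====
def Spec_determine_college_type (college_name : String) (out : String) : Prop := out = determine_college_type_alt college_name
instance (college_name : String) (out : String) : Decidable (Spec_determine_college_type college_name out) := by unfold Spec_determine_college_type; infer_instance

-- ===== CLAIM (what is proved, stated in full; the proofs are below) =====
def Claim_equal_determine_college_type : Prop := ∀ (college_name : String), Dom_determine_college_type college_name → Spec_determine_college_type college_name (determine_college_type college_name)

-- ===== LEMMAS AND PROOFS =====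

-- 'keyword kw starts at some position of l'
def dctHit (kw : List Char) (l : List Char) : Prop := ∃ j, kw <+: l.drop j

-- the value the scan converges to, expressed by the four substring conditions
def dctBest (l : List Char) : Nat :=
  if PySem.Chars.isIn "IIT".toList l then 0
  else if PySem.Chars.isIn "NIT".toList l then 1
  else if PySem.Chars.isIn "GOVERNMENT".toList l || PySem.Chars.isIn "STATE".toList l then 2
  else 3

lemma dctHit_cons (kw : List Char) (c : Char) (rest : List Char) :
    dctHit kw (c :: rest) ↔ kw <+: (c :: rest) ∨ dctHit kw rest := by
  constructor
  · rintro ⟨j, hj⟩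
    cases j with
    | zero => exact Or.inl hj
    | succ j => exact Or.inr ⟨j, by simpa using hj⟩
  · rintro (h | ⟨j, hj⟩)
    · exact ⟨0, h⟩
    · exact ⟨j + 1, by simpa using hj⟩

lemma dctIsIn_cons (kw : List Char) (c : Char) (rest : List Char) :
    PySem.Chars.isIn kw (c :: rest) =
      (PySem.Chars.startswith (c :: rest) kw || PySem.Chars.isIn kw rest) := by
  rw [Bool.eq_iff_iff, Bool.or_eq_true, ← PySem.Chars.exists_prefix_drop_iff_isIn,
      ← PySem.Chars.exists_prefix_drop_iff_isIn, PySem.Chars.startswith_iff]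
  exact dctHit_cons kw c rest

lemma dctPrio_le (t : List Char) : dctPrio t ≤ 3 := by
  unfold dctPrio; split_ifs <;> omega

lemma dctBest_le (l : List Char) : dctBest l ≤ 3 := by
  unfold dctBest; split_ifs <;> omega

set_option maxHeartbeats 1000000 in
lemma dctBest_cons (c : Char) (rest : List Char) :
    dctBest (c :: rest) = min (dctPrio (c :: rest)) (dctBest rest) := by
  unfold dctBest dctPrio
  rw [dctIsIn_cons, dctIsIn_cons, dctIsIn_cons, dctIsIn_cons]
  simp only [Bool.or_eq_true]
  split_ifs <;> first | rfl | omega | tauto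

lemma dctScan_eq (l : List Char) : ∀ b, b ≤ 3 → dctScan l b = min b (dctBest l) := by
  induction l with
  | nil =>
      intro b hb
      have h : dctBest [] = 3 := by decide
      simp only [dctScan, h]
      omega
  | cons c rest ih =>
      intro b hb
      have hp := dctPrio_le (c :: rest)
      have hbr := dctBest_le rest
      rw [show dctScan (c :: rest) b = dctScan rest (min b (dctPrio (c :: rest))) from rfl,
          ih _ (by omega), dctBest_cons]
      omega

-- an infix of an infix keyword is itself in the string
lemma dctIsIn_of_infix (kw1 kw2 s : List Char) (h : kw1 <:+: kw2)
    (h2 : PySem.Chars.isIn kw2 s = true) : PySem.Chars.isIn kw1 s = true := by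
  rw [PySem.Chars.isIn_iff_infix] at h2 ⊢
  exact h.trans h2

-- ===== VERDICT (by name: the statement is the Claim_ definition above) =====
theorem determine_college_type_spec : Claim_equal_determine_college_type := by
  intro college_name _
  unfold Spec_determine_college_type determine_college_type determine_college_type_alt
  dsimp only
  rw [dctScan_eq _ 3 (by omega), Nat.min_eq_right (dctBest_le _)]
  unfold dctBest dctLabels
  simp only [PySem.Str.isIn_eq, PySem.Str.toList_upper]
  generalize (PySem.Chars.upper college_name.toList) = L
  cases h0 : PySem.Chars.isIn "IIT".toList L with
  | true => simp only [h0]; rfl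
  | false =>
    have h4 : PySem.Chars.isIn "IIIT".toList L = false := by
      cases hh : PySem.Chars.isIn "IIIT".toList L
      · rfl
      · rw [dctIsIn_of_infix "IIT".toList "IIIT".toList L (by decide) hh] at h0; exact absurd h0 (by simp)
    cases h1 : PySem.Chars.isIn "NIT".toList L with
    | true => simp only [h0, h1, Bool.true_or]; rfl
    | false =>
      have hm' : PySem.Chars.isIn "MNIT".toList L = false := by
        cases hh : PySem.Chars.isIn "MNIT".toList L
        · rfl
        · rw [dctIsIn_of_infix "NIT".toList "MNIT".toList L (by decide) hh] at h1; exact absurd h1 (by simp)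
      have hv' : PySem.Chars.isIn "VNIT".toList L = false := by
        cases hh : PySem.Chars.isIn "VNIT".toList L
        · rfl
        · rw [dctIsIn_of_infix "NIT".toList "VNIT".toList L (by decide) hh] at h1; exact absurd h1 (by simp)
      cases h2 : PySem.Chars.isIn "GOVERNMENT".toList L <;>
        cases h3 : PySem.Chars.isIn "STATE".toList L <;>
          simp only [h0, h1, hm', hv', h4, h2, h3, List.any_cons, List.any_nil,
            Bool.or_false, Bool.or_true, Bool.true_or, Bool.false_or] <;> rfl
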